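-- pv_equiv track=rewrite | github.com/RayLiang1998/ai-resume-matcher | src/matcher.py | extract_relevant_jd_text
-- ===== SOURCE A (Python) =====
-- SECTION_MARKERS = [
--     "requirements",
--     "required qualifications",
--     "preferred qualifications",
--     "preferred",
--     "responsibilities",
--     "what you will do",
--     "what you'll do",
--     "skills",
--     "qualifications",
--     "technologies",
--     "tools",
--     "must have",
--     "nice to have",
-- ]
--
-- def extract_relevant_jd_text(jd):
--     """
--     Generic extraction of the most requirement-heavy parts of a JD.
--     If section markers are found, use text from those sections.
--     If not, fall back to the full JD.
--     """
--     if not jd: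
--         return ""
--
--     lines = jd.splitlines()
--     selected_lines = []
--     capture = False
--
--     for line in lines:
--         clean = line.strip()
--         lower = clean.lower().rstrip(":")
--
--         if any(marker in lower for marker in SECTION_MARKERS):
--             capture = True
--             selected_lines.append(clean)
--             continue
--
--         if capture:
--             selected_lines.append(clean)
--
--     selected_text = "\n".join(selected_lines).strip()
--     return selected_text if selected_text else jd
-- ===== SOURCE B (Python) =====
-- SECTION_MARKERS = [
--     "requirements",
--     "required qualifications",
--     "preferred qualifications",
--     "preferred",
--     "responsibilities",
--     "what you will do",
--     "what you'll do",
--     "skills",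
--     "qualifications",
--     "technologies",
--     "tools",
--     "must have",
--     "nice to have",
-- ]
--
--
-- def extract_relevant_jd_text(jd):
--     if not jd:
--         return ""
--     lines = jd.splitlines()
--     start = next((i for i, line in enumerate(lines)
--                   if any(m in line.strip().lower().rstrip(":")
--                          for m in SECTION_MARKERS)), None)
--     selected = [l.strip() for l in lines[start:]] if start is not None else []
--     text = "\n".join(selected).strip()
--     return text if text else jd
-- ===== Notes on version B (the rewrite author's own statement) =====
-- stated objective: simpler
-- what changed: Replaces the capture-flag accumulator pass with locating the first marker line's index and slicing the tail of the line list, stripping each kept line in a comprehension.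
import Mathlib
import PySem

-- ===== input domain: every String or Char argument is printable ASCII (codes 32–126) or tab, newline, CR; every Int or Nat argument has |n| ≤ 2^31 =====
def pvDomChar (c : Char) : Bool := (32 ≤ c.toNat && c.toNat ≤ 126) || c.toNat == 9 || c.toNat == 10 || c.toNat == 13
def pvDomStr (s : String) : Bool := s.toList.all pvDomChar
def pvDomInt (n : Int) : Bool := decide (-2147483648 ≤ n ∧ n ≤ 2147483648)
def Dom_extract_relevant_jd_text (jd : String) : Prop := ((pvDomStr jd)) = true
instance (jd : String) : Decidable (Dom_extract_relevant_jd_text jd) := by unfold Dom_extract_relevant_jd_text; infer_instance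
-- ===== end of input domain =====

-- B replaces A's capture-flag fold with find-first-marker-index + slice-and-strip of the tail (simpler decomposition).


-- ===== PORT A =====
def pvMarkers : List String :=
  ["requirements", "required qualifications", "preferred qualifications", "preferred",
   "responsibilities", "what you will do", "what you'll do", "skills", "qualifications",
   "technologies", "tools", "must have", "nice to have"]

-- line.strip().lower().rstrip(":")  — rstrip(":") ported by hand: drop trailing ':' chars (exact)
def pvNorm (line : String) : List Char :=
  ((PySem.Chars.lower (PySem.Chars.strip line.toList)).reverse.dropWhile (fun c => c == ':')).reverse

-- any(marker in lower for marker in SECTION_MARKERS)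
def pvHit (line : String) : Bool :=
  pvMarkers.any (fun m => PySem.Chars.isIn m.toList (pvNorm line))

-- the body of A's for-loop: state = (selected_lines, capture)
def pvStepA (acc : List String × Bool) (line : String) : List String × Bool :=
  let clean := PySem.Str.strip line
  if pvHit line then (acc.1 ++ [clean], true)
  else if acc.2 then (acc.1 ++ [clean], acc.2)
  else acc

def extract_relevant_jd_text (jd : String) : String :=
  if jd = "" then ""
  else
    let lines := PySem.Str.splitlines jd
    let r := lines.foldl pvStepA ([], false)
    let selected_text := PySem.Str.strip (PySem.Str.join "\n" r.1)
    if selected_text = "" then jd else selected_text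

-- ===== PORT B =====
def extract_relevant_jd_text_alt (jd : String) : String :=
  if jd = "" then ""
  else
    let lines := PySem.Str.splitlines jd
    -- next((i for i, line in enumerate(lines) if <marker test>), None)
    let selected : List String :=
      match lines.findIdx? pvHit with
      | some i => (lines.drop i).map PySem.Str.strip   -- [l.strip() for l in lines[i:]]
      | none => []
    let text := PySem.Str.strip (PySem.Str.join "\n" selected)
    if text = "" then jd else text

-- ===== PRECONDITION & SPEC =====
def Spec_extract_relevant_jd_text (jd : String) (out : String) : Prop := out = extract_relevant_jd_text_alt jd
instance (jd : String) (out : String) : Decidable (Spec_extract_relevant_jd_text jd out) := by unfold Spec_extract_relevant_jd_text; infer_instance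

-- ===== CLAIM (what is proved, stated in full; the proofs are below) =====
def Claim_equal_extract_relevant_jd_text : Prop := ∀ (jd : String), Dom_extract_relevant_jd_text jd → Spec_extract_relevant_jd_text jd (extract_relevant_jd_text jd)

-- ===== LEMMAS AND PROOFS =====

-- once capture is true, every remaining line's strip is appended
theorem pvLoopA_true (lines : List String) (acc : List String) :
    lines.foldl pvStepA (acc, true) = (acc ++ lines.map PySem.Str.strip, true) := by
  induction lines generalizing acc with
  | nil => simp
  | cons l t ih =>
    simp only [List.foldl_cons, List.map_cons, pvStepA]
    by_cases h : pvHit l = true <;> simp [h, ih, List.append_assoc]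

-- before capture, the fold's result is determined by the first marker line's index
theorem pvLoopA_false (lines : List String) (acc : List String) :
    lines.foldl pvStepA (acc, false) =
      match lines.findIdx? pvHit with
      | some i => (acc ++ (lines.drop i).map PySem.Str.strip, true)
      | none => (acc, false) := by
  induction lines generalizing acc with
  | nil => simp
  | cons l t ih =>
    simp only [List.foldl_cons, List.findIdx?_cons]
    by_cases h : pvHit l = true
    · simp only [pvStepA, h, if_true]
      simpa using pvLoopA_true t (acc ++ [PySem.Str.strip l])
    · simp only [pvStepA, h, if_neg, Bool.false_eq_true, not_false_iff]
      rw [ih acc]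
      cases t.findIdx? pvHit <;> simp

-- ===== VERDICT (by name: the statement is the Claim_ definition above) =====
theorem extract_relevant_jd_text_spec : Claim_equal_extract_relevant_jd_text := by
  intro jd _
  unfold Spec_extract_relevant_jd_text extract_relevant_jd_text extract_relevant_jd_text_alt
  by_cases h : jd = ""
  · simp [h]
  · simp only [h, if_false]
    rw [pvLoopA_false (PySem.Str.splitlines jd) []]
    cases (PySem.Str.splitlines jd).findIdx? pvHit <;> simp
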